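-- pv_equiv track=rewrite | github.com/RaviPabari/HackerRank-Problems | FunnyStrings.py | FunnyOrNot
-- ===== SOURCE A (Python) =====
-- def FunnyOrNot(s):
--     li1=[]
--     diff = []
--     for i in range(len(s)):
--         li1.append(ord(s[i]))
--     for i in range(len(li1)-1):
--         diff.append(abs(li1[i]-li1[i+1]))
--     return 'Funny' if diff == diff[::-1] else 'Not Funny'
-- ===== SOURCE B (Python) =====
-- def FunnyOrNot(s):
--     left, right = 0, len(s) - 1
--     while left < right:
--         if abs(ord(s[left]) - ord(s[left + 1])) != abs(ord(s[right]) - ord(s[right - 1])):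
--             return 'Not Funny'
--         left += 1
--         right -= 1
--     return 'Funny'
-- ===== Notes on version B (the rewrite author's own statement) =====
-- stated objective: simpler
-- what changed: Replaces building an ord list and a diff list and comparing the diff list with its reversal by a two-pointer scan over the string itself, keeping only two indices and exiting early on the first mismatch.
import Mathlib
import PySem

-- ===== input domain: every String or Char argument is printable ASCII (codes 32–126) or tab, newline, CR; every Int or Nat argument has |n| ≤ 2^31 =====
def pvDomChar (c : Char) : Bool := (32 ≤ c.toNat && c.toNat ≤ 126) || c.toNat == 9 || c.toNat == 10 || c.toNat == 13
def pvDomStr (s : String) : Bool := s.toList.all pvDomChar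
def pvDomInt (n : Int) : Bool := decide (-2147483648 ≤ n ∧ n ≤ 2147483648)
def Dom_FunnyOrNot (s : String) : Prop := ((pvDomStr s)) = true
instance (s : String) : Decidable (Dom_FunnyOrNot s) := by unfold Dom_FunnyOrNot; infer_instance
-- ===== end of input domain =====

-- B replaces A's two built lists and reversed-list comparison by a two-pointer scan
-- over the string with early exit (objective: simpler, O(1) extra space).

-- ===== PORT A =====
-- A: build li1 = [ord(s[i])], then diff = [abs(li1[i]-li1[i+1])], compare diff with its reversal.
def FunnyOrNot (s : String) : String :=
  let cs := s.toList
  let li1 : List Int :=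
    (List.range cs.length).foldl (fun acc i => acc ++ [((cs.getD i ' ').toNat : Int)]) []
  let diff : List Int :=
    (List.range (li1.length - 1)).foldl (fun acc i => acc ++ [|li1.getD i 0 - li1.getD (i+1) 0|]) []
  if diff = diff.reverse then "Funny" else "Not Funny"

-- ===== PORT B =====
-- the while-loop of Source B: two indices, early exit on first mismatch
def pvAltLoop (cs : List Char) (left right : Nat) : String :=
  if h : left < right then
    if |((cs.getD left ' ').toNat : Int) - ((cs.getD (left+1) ' ').toNat : Int)| ≠
       |((cs.getD right ' ').toNat : Int) - ((cs.getD (right-1) ' ').toNat : Int)| then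
      "Not Funny"
    else
      pvAltLoop cs (left+1) (right-1)
  else "Funny"
termination_by right - left
decreasing_by omega

def FunnyOrNot_alt (s : String) : String :=
  pvAltLoop s.toList 0 (s.toList.length - 1)

-- ===== PRECONDITION & SPEC =====
def Spec_FunnyOrNot (s : String) (out : String) : Prop := out = FunnyOrNot_alt s
instance (s : String) (out : String) : Decidable (Spec_FunnyOrNot s out) := by unfold Spec_FunnyOrNot; infer_instance

-- ===== CLAIM (what is proved, stated in full; the proofs are below) =====
def Claim_equal_FunnyOrNot : Prop := ∀ (s : String), Dom_FunnyOrNot s → Spec_FunnyOrNot s (FunnyOrNot s)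

-- ===== LEMMAS AND PROOFS =====

-- the i-th adjacent character difference of cs
def pvDD (cs : List Char) (i : Nat) : Int :=
  |((cs.getD i ' ').toNat : Int) - ((cs.getD (i+1) ' ').toNat : Int)|

theorem pv_foldl_append {α : Type} (f : Nat → α) :
    ∀ (l : List Nat) (a : List α),
      l.foldl (fun acc i => acc ++ [f i]) a = a ++ l.map f := by
  intro l
  induction l with
  | nil => simp
  | cons x xs ih => intro a; simp [List.foldl, ih]

theorem pv_A_char (s : String) :
    FunnyOrNot s =
      (if (List.range (s.toList.length - 1)).map (pvDD s.toList) =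
          ((List.range (s.toList.length - 1)).map (pvDD s.toList)).reverse
       then "Funny" else "Not Funny") := by
  unfold FunnyOrNot
  simp only [pv_foldl_append, List.nil_append, List.length_map, List.length_range]
  have hmap : (List.range (s.toList.length - 1)).map
      (fun i => |((List.range s.toList.length).map (fun j => ((s.toList.getD j ' ').toNat : Int))).getD i 0 -
                 ((List.range s.toList.length).map (fun j => ((s.toList.getD j ' ').toNat : Int))).getD (i+1) 0|)
      = (List.range (s.toList.length - 1)).map (pvDD s.toList) := by
    apply List.map_congr_left
    intro i hi
    simp only [List.mem_range] at hi
    have h1 : i < s.toList.length := by omega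
    have h2 : i + 1 < s.toList.length := by omega
    have h1' : i < s.length := by rwa [String.length_toList] at h1
    have h2' : i + 1 < s.length := by rwa [String.length_toList] at h2
    simp [List.getD, h1', h2', pvDD]
  rw [hmap]

-- palindrome ↔ pointwise mirror equality (over getD)
theorem pv_palindrome_iff (l : List Int) :
    l = l.reverse ↔ ∀ i, i < l.length → l.getD i 0 = l.getD (l.length - 1 - i) 0 := by
  constructor
  · intro h i hi
    conv_lhs => rw [h]
    have hi' : l.length - 1 - i < l.length := by omega
    simp [hi, hi', List.getElem_reverse]
  · intro h
    apply List.ext_getElem (by simp)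
    intro i h1 h2
    have hi' : l.length - 1 - i < l.length := by omega
    have hx := h i h1
    simp [h1, hi'] at hx
    simp [List.getElem_reverse, hx]

-- the two-pointer loop returns "Funny" iff every checked pair matches
theorem pv_loop_char (cs : List Char) :
    ∀ (r l : Nat), pvAltLoop cs l r = "Funny" ↔
      ∀ k, l ≤ k → 2 * k < l + r → pvDD cs k = pvDD cs (l + r - 1 - k) := by
  intro r
  induction r using Nat.strong_induction_on with
  | _ r ih =>
    intro l
    rw [pvAltLoop]
    by_cases h : l < r
    · rw [dif_pos h]
      have hr : pvDD cs (r-1) =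
          |((cs.getD r ' ').toNat : Int) - ((cs.getD (r-1) ' ').toNat : Int)| := by
        unfold pvDD
        rw [show r - 1 + 1 = r from by omega, abs_sub_comm]
      by_cases hc : pvDD cs l = pvDD cs (r - 1)
      · have hne : ¬ (|((cs.getD l ' ').toNat : Int) - ((cs.getD (l+1) ' ').toNat : Int)| ≠
            |((cs.getD r ' ').toNat : Int) - ((cs.getD (r-1) ' ').toNat : Int)|) := by
          rw [hr] at hc
          exact not_not_intro hc
        rw [if_neg hne]
        rw [ih (r-1) (by omega) (l+1)]
        constructor
        · intro hall k hk h2k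
          rcases Nat.eq_or_lt_of_le hk with rfl | hlt
          · rw [show l + r - 1 - l = r - 1 from by omega]
            exact hc
          · have hx := hall k (by omega) (by omega)
            rwa [show l + 1 + (r - 1) = l + r from by omega] at hx
        · intro hall k hk h2k
          rw [show l + 1 + (r - 1) = l + r from by omega]
          exact hall k (by omega) (by omega)
      · have hne : (|((cs.getD l ' ').toNat : Int) - ((cs.getD (l+1) ' ').toNat : Int)| ≠
            |((cs.getD r ' ').toNat : Int) - ((cs.getD (r-1) ' ').toNat : Int)|) := by
          rw [hr] at hc
          exact hc
        rw [if_pos hne]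
        constructor
        · intro hcon; exact absurd hcon (by decide)
        · intro hall
          exfalso
          apply hc
          have hx := hall l (le_refl l) (by omega)
          rwa [show l + r - 1 - l = r - 1 from by omega] at hx
    · rw [dif_neg h]
      constructor
      · intro _ k hk h2k; exact absurd h2k (by omega)
      · intro _; rfl

-- the loop only ever returns one of the two strings
theorem pv_loop_values (cs : List Char) :
    ∀ (r l : Nat), pvAltLoop cs l r = "Funny" ∨ pvAltLoop cs l r = "Not Funny" := by
  intro r
  induction r using Nat.strong_induction_on with
  | _ r ih =>
    intro l
    rw [pvAltLoop]
    by_cases h : l < r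
    · rw [dif_pos h]
      split
      · exact Or.inr rfl
      · exact ih (r-1) (by omega) (l+1)
    · rw [dif_neg h]
      exact Or.inl rfl

-- full mirror condition on [0, m) ↔ half condition checked by the loop
theorem pv_half_iff (cs : List Char) (m : Nat) :
    (∀ i, i < m → pvDD cs i = pvDD cs (m - 1 - i)) ↔
    (∀ k, 2 * k < m → pvDD cs k = pvDD cs (m - 1 - k)) := by
  constructor
  · intro h k h2k
    exact h k (by omega)
  · intro h i hi
    by_cases h2 : 2 * i < m
    · exact h i h2
    · have hx := h (m - 1 - i) (by omega)
      rw [show m - 1 - (m - 1 - i) = i from by omega] at hx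
      exact hx.symm

theorem FunnyOrNot_eq (s : String) : FunnyOrNot s = FunnyOrNot_alt s := by
  rw [pv_A_char]
  unfold FunnyOrNot_alt
  set cs := s.toList with hcs
  set m := cs.length - 1 with hm
  set D := (List.range m).map (pvDD cs) with hD
  have hDlen : D.length = m := by simp [hD]
  have hDget : ∀ i, i < m → D.getD i 0 = pvDD cs i := by
    intro i hi
    simp [hD, List.getD, hi]
  have hiff : (D = D.reverse) ↔ pvAltLoop cs 0 m = "Funny" := by
    rw [pv_palindrome_iff, pv_loop_char, hDlen]
    have hrhs : (∀ k, 0 ≤ k → 2 * k < 0 + m → pvDD cs k = pvDD cs (0 + m - 1 - k)) ↔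
        (∀ k, 2 * k < m → pvDD cs k = pvDD cs (m - 1 - k)) := by
      simp only [Nat.zero_add]
      exact ⟨fun h k hk => h k (Nat.zero_le k) hk, fun h k _ hk => h k hk⟩
    rw [hrhs, ← pv_half_iff cs m]
    constructor
    · intro h i hi
      have h1 := h i hi
      rw [hDget i hi, hDget (m - 1 - i) (by omega)] at h1
      exact h1
    · intro h i hi
      rw [hDget i hi, hDget (m - 1 - i) (by omega)]
      exact h i hi
  by_cases hpal : D = D.reverse
  · rw [if_pos hpal, (hiff.mp hpal).symm]
  · rw [if_neg hpal]
    rcases pv_loop_values cs m 0 with hf | hnf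
    · exact absurd (hiff.mpr hf) hpal
    · exact hnf.symm

-- ===== VERDICT (by name: the statement is the Claim_ definition above) =====
theorem FunnyOrNot_spec : Claim_equal_FunnyOrNot := by
  intro s _
  unfold Spec_FunnyOrNot
  exact FunnyOrNot_eq s
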